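-- pv_equiv track=rewrite | github.com/jonathantsang/CompetitiveProgramming | binarysearchio/contest14/3.py | solve
-- ===== SOURCE A (Python) =====
-- def solve(nums, k):
--     if k == 0:
--         return []
--
--     window = []
--     for i,v in enumerate(nums):
--         while window and window[-1] > v:
--             # if we pop, still has enough in array to fill k
--             if (len(window)+(len(nums)-i)-1) >= k:
--                 window.pop()
--             else:
--                 break
--         window.append(v)
--     return list(window)[:k]
-- ===== SOURCE B (Python) =====
-- def solve(nums, k):
--     if k <= 0:
--         return []
--     t = min(k, len(nums))
--     res = []
--     while t:
--         window = nums[:len(nums) - t + 1]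
--         mn = min(window)
--         m = window.index(mn)
--         res.append(mn)
--         nums = nums[m + 1:]
--         t -= 1
--     return res
-- ===== Notes on version B (the rewrite author's own statement) =====
-- stated objective: alternative
-- what changed: Replaced the single-pass monotonic stack with budgeted pops by a recursive greedy selection that repeatedly picks the leftmost minimum of the feasible window and recurses on the suffix after it.
-- outside the precondition, e.g. on solve([3, 1, 2], -1): A returns [1], B returns []
import Mathlib
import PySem

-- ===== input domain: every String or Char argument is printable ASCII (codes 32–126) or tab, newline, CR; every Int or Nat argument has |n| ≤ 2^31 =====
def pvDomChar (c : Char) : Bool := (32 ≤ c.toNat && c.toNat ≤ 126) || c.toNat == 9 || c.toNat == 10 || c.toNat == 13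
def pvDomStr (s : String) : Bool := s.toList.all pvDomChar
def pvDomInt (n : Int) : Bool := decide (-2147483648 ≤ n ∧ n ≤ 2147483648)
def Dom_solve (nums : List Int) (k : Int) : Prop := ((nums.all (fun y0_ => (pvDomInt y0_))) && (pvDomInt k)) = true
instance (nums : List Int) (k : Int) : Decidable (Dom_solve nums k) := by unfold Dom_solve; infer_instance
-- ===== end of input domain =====

-- B replaces A's monotonic stack (pops bounded by a remaining-budget guard) by a recursive
-- greedy selection of the leftmost minimum of each feasible window; alternative algorithm, not faster.

-- ===== PORT A =====
-- inner `while window and window[-1] > v: if len(window)+(len(nums)-i)-1 >= k: window.pop() else: break`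
def popA (n i k v : Int) (window : List Int) : List Int :=
  if h : window = [] then window
  else if window.getLast h > v then
    if ((window.length : Int) + (n - i) - 1 ≥ k) then popA n i k v window.dropLast
    else window
  else window
termination_by window.length
decreasing_by
  have : window.length ≠ 0 := fun h0 => h (List.eq_nil_of_length_eq_zero h0)
  simp [List.length_dropLast]; omega

def solve (nums : List Int) (k : Int) : List Int :=
  if k = 0 then []
  else
    PySem.List.slice
      ((PySem.List.enumerate nums 0).foldl
        (fun window iv => popA (nums.length : Int) iv.1 k iv.2 window ++ [iv.2]) [])
      none (some k)

-- ===== PORT B =====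
-- the `while t:` loop of Source B, with its rebinding of nums and the res accumulator;
-- the `none` branches are unreachable while t ≤ len(nums) (Python's min() would raise there)
def greedyLoop : List Int → Nat → List Int → List Int
  | _, 0, res => res
  | nums, t+1, res =>
    let w := PySem.List.slice nums none (some ((nums.length : Int) - ((t:Int)+1) + 1))
    match PySem.List.min? w (fun y => y) with
    | none => res
    | some mv =>
      match PySem.List.index? w mv with
      | none => res
      | some m => greedyLoop (PySem.List.slice nums (some ((m : Int) + 1)) none) t (res ++ [mv])

def solve_alt (nums : List Int) (k : Int) : List Int :=
  if k ≤ 0 then []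
  else greedyLoop nums (min k (nums.length : Int)).toNat []

-- ===== PRECONDITION & SPEC =====
-- Pre_ excludes negative k (outside the natural domain of a count), where A's negative slice
-- window[:k] drops trailing elements of the full budget-free stack — an accident of the slice.
def Pre_solve (nums : List Int) (k : Int) : Prop := 0 ≤ k
instance (nums : List Int) (k : Int) : Decidable (Pre_solve nums k) := by unfold Pre_solve; infer_instance
def pvWitness_solve : List Int × Int := ([2, 1, 3, 1], 2)

def Spec_solve (nums : List Int) (k : Int) (out : List Int) : Prop := out = solve_alt nums k
instance (nums : List Int) (k : Int) (out : List Int) : Decidable (Spec_solve nums k out) := by unfold Spec_solve; infer_instance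

-- ===== CLAIM (what is proved, stated in full; the proofs are below) =====
def Claim_equal_solve : Prop := ∀ (nums : List Int) (k : Int), Dom_solve nums k → Pre_solve nums k → Spec_solve nums k (solve nums k)

-- ===== LEMMAS AND PROOFS =====

-- proof-layer recursive form of B's while loop
def greedyB (nums : List Int) : Nat → List Int
  | 0 => []
  | t+1 =>
    let w := PySem.List.slice nums none (some ((nums.length : Int) - ((t:Int)+1) + 1))
    match PySem.List.min? w (fun y => y) with
    | none => []
    | some mv =>
      match PySem.List.index? w mv with
      | none => []
      | some m => mv :: greedyB (PySem.List.slice nums (some ((m : Int) + 1)) none) t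

theorem greedyLoop_eq_greedyB : ∀ (t : Nat) (nums res : List Int),
    greedyLoop nums t res = res ++ greedyB nums t := by
  intro t
  induction t with
  | zero => intro nums res; simp [greedyLoop, greedyB]
  | succ t ih =>
    intro nums res
    rw [greedyLoop, greedyB]
    cases h1 : PySem.List.min? (PySem.List.slice nums none (some ((nums.length : Int) - ((t:Int)+1) + 1))) (fun y => y) with
    | none => simp
    | some mv =>
      cases h2 : PySem.List.index? (PySem.List.slice nums none (some ((nums.length : Int) - ((t:Int)+1) + 1))) mv with
      | none =>
        rw [PySem.List.index?_eq_idxOf?] at h2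
        simp [h2]
      | some m =>
        rw [PySem.List.index?_eq_idxOf?] at h2
        simp [h2, ih]

-- proof-layer model of A's stack: head-first stack `s`, explicit index `i`
def popL (n i k v : Int) : List Int → List Int
  | [] => []
  | t :: s => if v < t ∧ ((s.length : Int) + 1 + (n - i) - 1 ≥ k) then popL n i k v s else t :: s

def runL (n k : Int) : Int → List Int → List Int → List Int
  | _, s, [] => s
  | i, s, x :: rest => runL n k (i+1) (x :: popL n i k x s) rest

-- bridge: popA on the reversed stack is popL
theorem popA_eq_popL (n i k v : Int) (s : List Int) :
    popA n i k v s.reverse = (popL n i k v s).reverse := by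
  induction s with
  | nil => simp [popA, popL]
  | cons t s ih =>
    rw [popA]
    simp only [popL, List.reverse_cons]
    have hne : s.reverse ++ [t] ≠ [] := by simp
    rw [dif_neg hne]
    have hl : (s.reverse ++ [t]).getLast hne = t := List.getLast_concat
    have hd : (s.reverse ++ [t]).dropLast = s.reverse := List.dropLast_concat ..
    have hlen : ((s.reverse ++ [t]).length : Int) = (s.length : Int) + 1 := by simp
    rw [hl, hd, hlen]
    by_cases h1 : v < t
    · by_cases h2 : ((s.length : Int) + 1 + (n - i) - 1 ≥ k)
      · rw [if_pos h1, if_pos h2, if_pos ⟨h1, h2⟩, ih]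
      · rw [if_pos h1, if_neg h2, if_neg (by tauto)]
        simp
    · rw [if_neg h1, if_neg (by tauto)]
      simp

-- bridge: A's enumerate-foldl is runL on the reversed stack
theorem foldA_eq_runL (n k : Int) (l : List Int) : ∀ (i : Int) (s : List Int),
    (PySem.List.enumerate l i).foldl (fun w iv => popA n iv.1 k iv.2 w ++ [iv.2]) s.reverse
      = (runL n k i s l).reverse := by
  induction l with
  | nil => intro i s; simp [PySem.List.enumerate_nil, runL]
  | cons x rest ih =>
    intro i s
    rw [PySem.List.enumerate_cons]
    simp only [List.foldl_cons, runL]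
    rw [popA_eq_popL]
    have : (popL n i k x s).reverse ++ [x] = (x :: popL n i k x s).reverse := by simp
    rw [this, ih]

theorem solve_eq_runL (nums : List Int) (k : Int) (hk : 0 < k) :
    solve nums k = (runL (nums.length : Int) k 0 [] nums).reverse.take k.toNat := by
  have h0 : k ≠ 0 := by omega
  rw [solve, if_neg h0]
  
  have := foldA_eq_runL (nums.length : Int) k nums 0 []
  simp only [List.reverse_nil] at this
  rw [this, PySem.List.slice_to _ (by omega)]

-- guard shift: popL/runL depend on n and i only through n - i
theorem popL_shift (n i k v c : Int) (s : List Int) :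
    popL n i k v s = popL (n + c) (i + c) k v s := by
  induction s with
  | nil => rfl
  | cons t s ih =>
    simp only [popL]
    have : ((s.length : Int) + 1 + (n - i) - 1 ≥ k) ↔ ((s.length : Int) + 1 + ((n+c) - (i+c)) - 1 ≥ k) := by
      constructor <;> intro h <;> omega
    by_cases h1 : v < t
    · by_cases h2 : ((s.length : Int) + 1 + (n - i) - 1 ≥ k)
      · rw [if_pos ⟨h1, h2⟩, if_pos ⟨h1, this.mp h2⟩, ih]
      · rw [if_neg (by tauto), if_neg (by rw [← this] at *; tauto)]
    · rw [if_neg (by tauto), if_neg (by tauto)]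

theorem runL_shift (n k c : Int) (l : List Int) : ∀ (i : Int) (s : List Int),
    runL n k i s l = runL (n + c) k (i + c) s l := by
  induction l with
  | nil => intro i s; rfl
  | cons x rest ih =>
    intro i s
    simp only [runL]
    rw [← popL_shift n i k x c s]
    have : i + c + 1 = (i + 1) + c := by ring
    rw [this, ← ih]

theorem mem_popL (n i k v : Int) (s : List Int) (x : Int) (hx : x ∈ popL n i k v s) : x ∈ s := by
  induction s with
  | nil => simpa [popL] using hx
  | cons t s ih =>
    simp only [popL] at hx
    split at hx
    · exact List.mem_cons_of_mem _ (ih hx)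
    · exact hx

theorem mem_runL (n k : Int) (l : List Int) : ∀ (i : Int) (s : List Int) (x : Int),
    x ∈ runL n k i s l → x ∈ s ∨ x ∈ l := by
  induction l with
  | nil => intro i s x hx; exact Or.inl hx
  | cons y rest ih =>
    intro i s x hx
    rcases ih _ _ _ hx with h | h
    · rcases List.mem_cons.mp h with h | h
      · exact Or.inr (by simp [h])
      · exact Or.inl (mem_popL _ _ _ _ _ _ h)
    · exact Or.inr (List.mem_cons_of_mem _ h)

-- all elements strictly bigger and pops allowed ⇒ the stack empties
theorem popL_all (n i k v : Int) (s : List Int) (h : ∀ x ∈ s, v < x) (hi : i ≤ n - k) :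
    popL n i k v s = [] := by
  induction s with
  | nil => rfl
  | cons t s ih =>
    simp only [popL]
    rw [if_pos ⟨h t (by simp), by have h0 : (0:Int) ≤ (s.length:Int) := Int.natCast_nonneg _; omega⟩]
    exact ih (fun x hx => h x (List.mem_cons_of_mem _ hx))

-- a permanent bottom element: pops act only on the upper stack, with budget k-1
theorem popL_concat (n i k v b : Int) (s : List Int) (hstop : v < b → n - i < k) :
    popL n i k v (s ++ [b]) = popL n i (k-1) v s ++ [b] := by
  induction s with
  | nil =>
    simp only [popL, List.nil_append]
    rw [if_neg]
    rintro ⟨h1, h2⟩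
    have := hstop h1
    simp at h2
    omega
  | cons t s ih =>
    simp only [List.cons_append, popL]
    have hlen : (((s ++ [b]).length : Int) + 1 + (n - i) - 1 ≥ k) ↔ ((s.length : Int) + 1 + (n - i) - 1 ≥ k - 1) := by
      simp; constructor <;> intro h <;> omega
    by_cases h1 : v < t
    · by_cases h2 : ((s.length : Int) + 1 + (n - i) - 1 ≥ k - 1)
      · rw [if_pos ⟨h1, hlen.mpr h2⟩, if_pos ⟨h1, h2⟩, ih]
      · rw [if_neg (by rw [hlen]; tauto), if_neg (by tauto)]; rfl
    · rw [if_neg (by tauto), if_neg (by tauto)]; rfl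


theorem runL_concat (n k b : Int) (l : List Int) : ∀ (i : Int) (s : List Int),
    (∀ (j : Nat) (hj : j < l.length), l[j] < b → n - (i + j) < k) →
    runL n k i (s ++ [b]) l = runL n (k-1) i s l ++ [b] := by
  induction l with
  | nil => intro i s _; rfl
  | cons x rest ih =>
    intro i s h
    simp only [runL]
    rw [popL_concat n i k x b s (by simpa using h 0 (by simp))]
    have : x :: (popL n i (k-1) x s ++ [b]) = (x :: popL n i (k-1) x s) ++ [b] := by simp
    rw [this, ih]
    intro j hj hlt
    have := h (j+1) (by simpa using Nat.succ_lt_succ hj) (by simpa using hlt)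
    push_cast at this ⊢
    omega

theorem popL_nopop (n i k v : Int) (s : List Int) (h : (s.length : Int) + (n - i) - 1 < k) :
    popL n i k v s = s := by
  cases s with
  | nil => rfl
  | cons t s => simp only [popL]; rw [if_neg]; rintro ⟨_, h2⟩; simp at h; omega

theorem runL_nopop (n k : Int) (hn : n ≤ k) (l : List Int) : ∀ (i : Int) (s : List Int),
    (s.length : Int) ≤ i → runL n k i s l = l.reverse ++ s := by
  induction l with
  | nil => intro i s _; rfl
  | cons x rest ih =>
    intro i s hs
    simp only [runL]
    rw [popL_nopop n i k x s (by omega)]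
    rw [ih (i+1) (x :: s) (by simp; omega)]
    simp

theorem runL_append (n k : Int) (xs : List Int) : ∀ (ys : List Int) (i : Int) (s : List Int),
    runL n k i s (xs ++ ys) = runL n k (i + xs.length) (runL n k i s xs) ys := by
  induction xs with
  | nil => intro ys i s; simp [runL]
  | cons x rest ih =>
    intro ys i s
    simp only [List.cons_append, runL]
    rw [ih]
    rw [show i + ((x :: rest).length : Int) = (i + 1) + (rest.length : Int) by push_cast [List.length_cons]; ring]

-- MAIN: truncated stack run = greedy selection, for t ≤ len nums
theorem main_lemma : ∀ (t : Nat) (nums : List Int), t ≤ nums.length →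
    (runL (nums.length : Int) (t : Int) 0 [] nums).reverse.take t = greedyB nums t := by
  intro t
  induction t with
  | zero => intro nums _; simp [greedyB]
  | succ t ih =>
    intro nums ht
    set n := nums.length with hn
    -- the greedy window
    have hwb : (n : Int) - ((t:Int)+1) + 1 = ((n - t : Nat) : Int) := by
      push_cast [Nat.cast_sub (by omega : t ≤ n)]; ring
    have hw : PySem.List.slice nums none (some ((n : Int) - ((t:Int)+1) + 1))
        = nums.take (n - t) := by
      rw [hwb, PySem.List.slice_to_natCast]
    have hwlen : (nums.take (n - t)).length = n - t := by
      rw [List.length_take, ← hn]; omega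
    have hwne : nums.take (n - t) ≠ [] := by
      intro h0; rw [← List.length_eq_zero_iff] at h0; omega
    obtain ⟨mv, hmv⟩ : ∃ mv, PySem.List.min? (nums.take (n - t)) (fun y => y) = some mv := by
      cases hmin : PySem.List.min? (nums.take (n - t)) (fun y => y) with
      | none => exact absurd ((PySem.List.min?_eq_none_iff _ _).mp hmin) hwne
      | some mv => exact ⟨mv, rfl⟩
    have hmv_mem : mv ∈ nums.take (n - t) := PySem.List.min?_mem hmv
    have hmv_min : ∀ y ∈ nums.take (n - t), mv ≤ y := fun y hy => PySem.List.min?_isMin hmv y hy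
    obtain ⟨m, hm⟩ : ∃ m, PySem.List.index? (nums.take (n - t)) mv = some m := by
      cases hidx : PySem.List.index? (nums.take (n - t)) mv with
      | none => exact absurd ((PySem.List.index?_eq_none_iff _ _).mp hidx) (by simp [hmv_mem])
      | some m => exact ⟨m, rfl⟩
    obtain ⟨hmlt, hwm, hmfirst⟩ := PySem.List.getElem_of_index?_eq_some hm
    rw [hwlen] at hmlt
    -- basic index facts
    have hmn : m < n := by omega
    have hnumsm : nums[m]'hmn = mv := by
      rw [← hwm]; simp [List.getElem_take]
    -- greedy side unfolds to mv :: greedyB (drop (m+1)) t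
    have hdrop : PySem.List.slice nums (some ((m:Int)+1)) none = nums.drop (m+1) := by
      have : ((m:Int)+1) = ((m+1 : Nat) : Int) := by push_cast; ring
      rw [this, PySem.List.slice_from_natCast]
    have hgreedy : greedyB nums (t+1) = mv :: greedyB (nums.drop (m+1)) t := by
      simp only [greedyB, ← hn, hw, hmv, hm, hdrop]
    -- stack side: decompose nums = take m ++ mv :: drop (m+1)
    have hsplit : nums = nums.take m ++ mv :: nums.drop (m+1) := by
      conv_lhs => rw [← List.take_append_drop m nums]
      rw [List.drop_eq_getElem_cons hmn, hnumsm]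
    have htm : (nums.take m).length = m := by simp; omega
    -- after the prefix and mv, the stack is exactly [mv]
    have hpre_gt : ∀ x ∈ runL (n : Int) ((t:Int)+1) 0 [] (nums.take m), mv < x := by
      intro x hx
      rcases mem_runL _ _ _ _ _ _ hx with h | h
      · simp at h
      · obtain ⟨j, hj, hxj⟩ := List.mem_iff_getElem.mp h
        rw [htm] at hj
        have hjw : j < (nums.take (n-t)).length := by omega
        have : x = (nums.take (n-t))[j]'hjw := by
          rw [← hxj]; simp [List.getElem_take]
        have hne : x ≠ mv := by rw [this]; exact hmfirst j (by omega)
        have hle : mv ≤ x := hmv_min x (this ▸ List.getElem_mem hjw)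
        omega
    have hrun1 : runL (n : Int) ((t:Int)+1) 0 [] nums
        = runL (n : Int) ((t:Int)+1) ((m:Int)+1) [mv] (nums.drop (m+1)) := by
      conv_lhs => rw [hsplit]
      rw [runL_append, htm]
      simp only [runL, Int.zero_add]
      rw [popL_all _ _ _ _ _ hpre_gt (by omega)]
    -- mv is a permanent bottom
    have hbot : ∀ (j : Nat) (hj : j < (nums.drop (m+1)).length),
        (nums.drop (m+1))[j] < mv → (n : Int) - (((m:Int)+1) + j) < (t:Int)+1 := by
      intro j hj hlt
      by_contra hge
      push_neg at hge
      have hidx : m + 1 + j < n - t := by omega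
      have hjw : m + 1 + j < (nums.take (n-t)).length := by omega
      have : (nums.drop (m+1))[j] = (nums.take (n-t))[m+1+j]'hjw := by
        simp [List.getElem_drop, List.getElem_take]
      rw [this] at hlt
      exact absurd (hmv_min _ (List.getElem_mem hjw)) (by omega)
    have hrun2 : runL (n : Int) ((t:Int)+1) ((m:Int)+1) ([] ++ [mv]) (nums.drop (m+1))
        = runL (n : Int) ((t:Int)+1-1) ((m:Int)+1) [] (nums.drop (m+1)) ++ [mv] :=
      runL_concat _ _ _ _ _ _ hbot
    have hdlen : (nums.drop (m+1)).length = n - (m+1) := by simp [← hn]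
    have hshift : runL (n : Int) (t:Int) ((m:Int)+1) [] (nums.drop (m+1))
        = runL ((nums.drop (m+1)).length : Int) (t:Int) 0 [] (nums.drop (m+1)) := by
      have hs := runL_shift ((nums.drop (m+1)).length : Int) (t:Int) ((m:Int)+1) (nums.drop (m+1)) 0 []
      rw [show ((0:Int) + ((m:Int)+1)) = (m:Int)+1 by ring] at hs
      rw [show ((nums.drop (m+1)).length : Int) + ((m:Int)+1) = (n:Int) by
        rw [hdlen]; push_cast [Nat.cast_sub (by omega : m + 1 ≤ n)]; ring] at hs
      exact hs.symm
    calc (runL (n : Int) ((t:Int)+1) 0 [] nums).reverse.take (t+1)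
        = (runL ((nums.drop (m+1)).length : Int) (t:Int) 0 [] (nums.drop (m+1)) ++ [mv]).reverse.take (t+1) := by
          rw [hrun1, show ([mv] : List Int) = [] ++ [mv] from rfl, hrun2]
          rw [show (t:Int)+1-1 = (t:Int) by ring, hshift]
          simp
      _ = mv :: (runL ((nums.drop (m+1)).length : Int) (t:Int) 0 [] (nums.drop (m+1))).reverse.take t := by
          simp
      _ = mv :: greedyB (nums.drop (m+1)) t := by
          rw [ih _ (by omega)]
      _ = greedyB nums (t+1) := hgreedy.symm

-- ===== VERDICT (by name: the statement is the Claim_ definition above) =====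
theorem solve_spec : Claim_equal_solve := by
  intro nums k _ hpre
  unfold Spec_solve Pre_solve at *
  by_cases hk0 : k = 0
  · subst hk0; simp [solve, solve_alt]
  have hk : 0 < k := lt_of_le_of_ne hpre (Ne.symm hk0)
  rw [solve_eq_runL nums k hk, solve_alt, if_neg (by omega)]
  by_cases hkn : k ≤ (nums.length : Int)
  · have ht : (min k (nums.length : Int)).toNat = k.toNat := by omega
    rw [ht]
    have hcast : ((k.toNat : Int)) = k := Int.toNat_of_nonneg hpre
    have hle : k.toNat ≤ nums.length := by omega
    have := main_lemma k.toNat nums hle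
    rw [hcast] at this
    rw [greedyLoop_eq_greedyB, List.nil_append]
    exact this
  · push_neg at hkn
    have ht : (min k (nums.length : Int)).toNat = nums.length := by omega
    rw [ht]
    have h1 : runL (nums.length : Int) k 0 [] nums = nums.reverse ++ [] :=
      runL_nopop _ _ (by omega) nums 0 [] (by simp)
    have h2 := main_lemma nums.length nums (le_refl _)
    have h3 : runL (nums.length : Int) (nums.length : Int) 0 [] nums = nums.reverse ++ [] :=
      runL_nopop _ _ (le_refl _) nums 0 [] (by simp)
    rw [h3] at h2
    rw [h1]
    simp only [List.append_nil, List.reverse_reverse] at h2 ⊢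
    rw [greedyLoop_eq_greedyB, List.nil_append, ← h2]
    rw [List.take_of_length_le (by omega), List.take_of_length_le (by omega)]
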